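-- pv_equiv track=rewrite | github.com/20161609/English-Drill | Functions/provider.py | _dedup5
-- ===== SOURCE A (Python) =====
-- def _dedup5(items):
--     seen, out = set(), []
--     for t in items:
--         t = (t or "").strip()
--         if not t:
--             continue
--         if t not in seen:
--             seen.add(t)
--             out.append(t)
--         if len(out) == 5:
--             break
--     while len(out) < 5 and out:
--         out.append(out[-1])
--     return out[:5] if out else ["", "", "", "", ""]
-- ===== SOURCE B (Python) =====
-- def _dedup5(items):
--     # Selection by repeated search: pull out, one at a time, the first cleaned
--     # item not already chosen, up to five times; then pad/slice to length 5.
--     def first_new(chosen):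
--         for raw in items:
--             t = (raw or "").strip()
--             if t and t not in chosen:
--                 return t
--         return None
--
--     out = []
--     for _ in range(5):
--         t = first_new(out)
--         if t is None:
--             break
--         out.append(t)
--     return (out + [out[-1]] * 4)[:5] if out else ["", "", "", "", ""]
-- ===== Notes on version B (the rewrite author's own statement) =====
-- stated objective: alternative
-- what changed: Replaces A's single streaming pass with an auxiliary seen-set, early break and a while-padding loop by selection via repeated search: up to five scans of the whole input, each picking the first cleaned item not already chosen, then padding by list replication and slicing.
import Mathlib
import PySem

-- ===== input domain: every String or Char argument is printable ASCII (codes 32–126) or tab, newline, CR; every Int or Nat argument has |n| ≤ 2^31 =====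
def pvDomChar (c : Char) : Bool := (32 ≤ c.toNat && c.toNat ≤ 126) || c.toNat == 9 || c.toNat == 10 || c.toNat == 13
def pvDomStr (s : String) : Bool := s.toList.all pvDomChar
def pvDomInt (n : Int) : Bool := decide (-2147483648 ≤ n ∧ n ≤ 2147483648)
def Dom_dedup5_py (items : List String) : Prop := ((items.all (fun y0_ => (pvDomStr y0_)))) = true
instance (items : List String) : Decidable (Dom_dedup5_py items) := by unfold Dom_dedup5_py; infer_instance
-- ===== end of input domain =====

-- B replaces A's single streaming pass (seen-set + early break + while-padding) by
-- selection via repeated search: up to five scans, each picking the first cleaned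
-- item not already chosen, then padding by replication and slicing (objective: alternative).

-- ===== PORT A =====
-- the for-loop: state (seen, out); 'break' = returning out when len(out) == 5
def dedup5_loopA : List String → PySem.Set String → List String → List String
  | [], _, out => out
  | t :: rest, seen, out =>
    let t := PySem.Str.strip t          -- (t or "").strip(); t is a string, so 'or' keeps t
    if t == "" then dedup5_loopA rest seen out
    else
      let seen' := if PySem.Set.contains seen t then seen else PySem.Set.add seen t
      let out'  := if PySem.Set.contains seen t then out else out ++ [t]
      if out'.length == 5 then out' else dedup5_loopA rest seen' out'

-- the while-loop: out.append(out[-1]) while len(out) < 5 and out; out[-1] is exact since out ≠ []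
def dedup5_padA (out : List String) : List String :=
  if h : out.length < 5 ∧ out ≠ [] then dedup5_padA (out ++ [out.getLast h.2]) else out
termination_by 5 - out.length
decreasing_by simp; omega

def dedup5_py (items : List String) : List String :=
  let out := dedup5_loopA items PySem.Set.empty []
  let out := dedup5_padA out
  if out ≠ [] then PySem.List.slice out none (some 5) else ["", "", "", "", ""]

-- ===== PORT B =====
-- first_new: scan items for the first cleaned string not already chosen
def dedup5_firstNew (items : List String) (chosen : List String) : Option String :=
  match items with
  | [] => none
  | raw :: rest =>
    let t := PySem.Str.strip raw        -- (raw or "").strip(); raw is a string, so 'or' keeps raw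
    if !(t == "") && !(chosen.contains t) then some t
    else dedup5_firstNew rest chosen

-- the 'for _ in range(5)' loop: fuel counts the remaining iterations
def dedup5_pick (items : List String) : Nat → List String → List String
  | 0, out => out
  | n + 1, out =>
    match dedup5_firstNew items out with
    | none => out
    | some t => dedup5_pick items n (out ++ [t])

def dedup5_py_alt (items : List String) : List String :=
  let out := dedup5_pick items 5 []
  if out ≠ [] then
    PySem.List.slice (out ++ List.replicate 4 out.getLast!) none (some 5)  -- (out + [out[-1]]*4)[:5]; out[-1] exact since out ≠ []
  else ["", "", "", "", ""]

-- ===== PRECONDITION & SPEC =====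
def Spec_dedup5_py (items : List String) (out : List String) : Prop := out = dedup5_py_alt items
instance (items : List String) (out : List String) : Decidable (Spec_dedup5_py items out) := by unfold Spec_dedup5_py; infer_instance

-- ===== CLAIM (what is proved, stated in full; the proofs are below) =====
def Claim_equal_dedup5_py : Prop := ∀ (items : List String), Dom_dedup5_py items → Spec_dedup5_py items (dedup5_py items)

-- ===== LEMMAS AND PROOFS =====

-- the cleaning phase, named for the proofs: strip every item, keep the nonempty ones
def pvCl (xs : List String) : List String :=
  (xs.map (fun t => PySem.Str.strip t)).filter (fun s => !(s == ""))

theorem pvCl_cons (t : String) (xs : List String) :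
    pvCl (t :: xs) = if PySem.Str.strip t == "" then pvCl xs else PySem.Str.strip t :: pvCl xs := by
  by_cases h : PySem.Str.strip t == "" <;> simp [pvCl, h]

theorem pvUpdate_prefix (ys : List String) : ∀ (s : PySem.Set String), s <+: PySem.Set.update s ys := by
  induction ys with
  | nil => intro s; simp [PySem.Set.update_nil]
  | cons y ys ih =>
    intro s
    rw [PySem.Set.update_cons]
    refine List.IsPrefix.trans ?_ (ih (PySem.Set.add s y))
    unfold PySem.Set.add
    split <;> simp

-- A's loop computes the first five elements of the ordered dedup of the cleaned list
theorem pvLoopA_eq : ∀ (xs out : List String), out.Nodup → out.length < 5 →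
    dedup5_loopA xs (PySem.Set.ofList out) out
      = (PySem.Set.update (PySem.Set.ofList out) (pvCl xs)).take 5 := by
  intro xs
  induction xs with
  | nil =>
    intro out hnd hlt
    simp [dedup5_loopA, pvCl, PySem.Set.update_nil,
      PySem.Set.ofList_eq_self_of_nodup _ hnd, List.take_of_length_le (Nat.le_of_lt hlt)]
  | cons t xs ih =>
    intro out hnd hlt
    rw [pvCl_cons]
    by_cases hs : PySem.Str.strip t == ""
    · simp only [dedup5_loopA, hs, if_pos]
      exact ih out hnd hlt
    · simp only [dedup5_loopA, hs, if_neg, Bool.not_eq_true]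
      by_cases hm : PySem.Str.strip t ∈ out
      · have hc : PySem.Set.contains (PySem.Set.ofList out) (PySem.Str.strip t) = true := by
          rw [PySem.Set.contains_iff]
          simp only [PySem.Set.mem_ofList]
          exact hm
        have hne5 : (out.length == 5) = false := by simp; omega
        simp only [hc, if_true, hne5, Bool.false_eq_true, if_false]
        rw [ih out hnd hlt, PySem.Set.update_cons]
        have : PySem.Set.add (PySem.Set.ofList out) (PySem.Str.strip t) = PySem.Set.ofList out := by
          unfold PySem.Set.add; rw [hc]; simp
        rw [this]
      · have hc : PySem.Set.contains (PySem.Set.ofList out) (PySem.Str.strip t) = false := by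
          rw [Bool.eq_false_iff]
          intro h
          rw [PySem.Set.contains_iff] at h
          simp only [PySem.Set.mem_ofList] at h
          exact hm h
        have hadd : PySem.Set.add (PySem.Set.ofList out) (PySem.Str.strip t)
            = PySem.Set.ofList (out ++ [PySem.Str.strip t]) := by
          rw [PySem.Set.ofList_append_singleton]
        have hnd' : (out ++ [PySem.Str.strip t]).Nodup := by
          refine List.Nodup.append hnd (List.nodup_singleton _) ?_
          intro a ha hb
          rw [List.mem_singleton] at hb
          subst hb; exact hm ha
        simp only [hc, Bool.false_eq_true, if_false]
        rw [PySem.Set.update_cons, hadd]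
        by_cases h5 : (out ++ [PySem.Str.strip t]).length = 5
        · have hb : ((out ++ [PySem.Str.strip t]).length == 5) = true := by simp [h5]
          simp only [hb, if_true]
          obtain ⟨zs, hzs⟩ := pvUpdate_prefix (pvCl xs) (PySem.Set.ofList (out ++ [PySem.Str.strip t]))
          rw [PySem.Set.ofList_eq_self_of_nodup _ hnd'] at hzs ⊢
          rw [← hzs]
          have h4 : out.length = 4 := by simp at h5; omega
          simp [List.take_append, h4, List.take_of_length_le (by omega : out.length ≤ 5)]
        · have hb : ((out ++ [PySem.Str.strip t]).length == 5) = false := by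
            rw [beq_eq_false_iff_ne]; exact h5
          have hlt' : (out ++ [PySem.Str.strip t]).length < 5 := by
            simp at h5 ⊢; omega
          simp only [hb, Bool.false_eq_true, if_false]
          exact ih (out ++ [PySem.Str.strip t]) hnd' hlt'

theorem pvGetLastBang (l : List String) (h : l ≠ []) : l.getLast h = l.getLast! := by
  cases l with
  | nil => exact absurd rfl h
  | cons a as => rfl

-- A's while-loop pads with replications of the last element
theorem pvPadA_eq : ∀ (n : Nat) (out : List String), 5 - out.length = n → out ≠ [] →
    dedup5_padA out = out ++ List.replicate (5 - out.length) out.getLast! := by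
  intro n
  induction n with
  | zero =>
    intro out hn hne
    rw [dedup5_padA]
    have h1 : ¬ (out.length < 5 ∧ out ≠ []) := by intro ⟨h, _⟩; omega
    simp [h1, show 5 - out.length = 0 from hn]
  | succ k ih =>
    intro out hn hne
    rw [dedup5_padA]
    have hlt : out.length < 5 := by omega
    rw [dif_pos ⟨hlt, hne⟩]
    have hlast : out.getLast hne = out.getLast! := pvGetLastBang out hne
    rw [ih (out ++ [out.getLast hne]) (by simp; omega) (by simp)]
    have hgl : (out ++ [out.getLast hne]).getLast! = out.getLast! := by
      rw [← pvGetLastBang (out ++ [out.getLast hne]) (by simp), List.getLast_append_singleton, hlast]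
    rw [hgl, List.append_assoc]
    congr 1
    rw [hlast]
    have h1 : 5 - (out ++ [out.getLast!]).length = k := by simp; omega
    have h2 : 5 - out.length = k + 1 := hn
    rw [h1, h2, List.replicate_succ, List.singleton_append]

-- B's inner scan is a find? over the cleaned list
theorem pvFirstNew_eq (items : List String) (chosen : List String) :
    dedup5_firstNew items chosen = (pvCl items).find? (fun t => !(chosen.contains t)) := by
  induction items with
  | nil => simp [dedup5_firstNew, pvCl]
  | cons raw rest ih =>
    rw [pvCl_cons]
    by_cases hs : PySem.Str.strip raw == ""
    · simp only [dedup5_firstNew, hs, Bool.not_true, Bool.false_and, if_pos]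
      simpa [hs] using ih
    · by_cases hc : PySem.Str.strip raw ∈ chosen
      · simp [dedup5_firstNew, hs, hc, ih]
      · simp [dedup5_firstNew, hs, hc]

-- a list of chosen elements finds nothing new in itself
theorem pvFind_none_of_subset (l chosen : List String) (h : ∀ x ∈ l, x ∈ chosen) :
    l.find? (fun t => !(chosen.contains t)) = none := by
  rw [List.find?_eq_none]
  intro x hx
  simp [h x hx]

-- find? (not chosen) is blind to duplicate removal: update only appends unseen elements
theorem pvFind_update (c : List String) : ∀ (s chosen : List String), (∀ x ∈ s, x ∈ chosen) →
    (PySem.Set.update s c).find? (fun t => !(chosen.contains t))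
      = c.find? (fun t => !(chosen.contains t)) := by
  induction c with
  | nil =>
    intro s chosen hs
    rw [PySem.Set.update_nil, pvFind_none_of_subset s chosen hs]
    simp
  | cons a c ih =>
    intro s chosen hs
    rw [PySem.Set.update_cons]
    by_cases ha : a ∈ chosen
    · have h2 : List.find? (fun t => !(chosen.contains t)) (a :: c)
          = List.find? (fun t => !(chosen.contains t)) c := by simp [ha]
      rw [h2]
      refine ih (PySem.Set.add s a) chosen ?_
      intro x hx
      unfold PySem.Set.add at hx
      split at hx
      · exact hs x hx
      · rcases List.mem_append.mp hx with h | h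
        · exact hs x h
        · rw [List.mem_singleton] at h; subst h; exact ha
    · have h2 : List.find? (fun t => !(chosen.contains t)) (a :: c) = some a := by simp [ha]
      rw [h2]
      have has : a ∉ s := fun h => ha (hs a h)
      have hadd : PySem.Set.add s a = s ++ [a] := by
        unfold PySem.Set.add
        rw [if_neg (by simpa [PySem.Set.contains_iff] using has)]
      obtain ⟨zs, hzs⟩ := pvUpdate_prefix c (PySem.Set.add s a)
      rw [← hzs, hadd, List.append_assoc, List.find?_append,
        pvFind_none_of_subset s chosen hs]
      simp [ha]

-- on a duplicate-free list, the first element not among the first k is element k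
theorem pvFind_take (d : List String) (k : Nat) (hnd : d.Nodup) :
    d.find? (fun t => !((d.take k).contains t)) = d[k]? := by
  have hsplit : d.find? (fun t => !((d.take k).contains t))
      = ((d.take k).find? (fun t => !((d.take k).contains t))).or
          ((d.drop k).find? (fun t => !((d.take k).contains t))) := by
    rw [← List.find?_append, List.take_append_drop]
  rw [hsplit, pvFind_none_of_subset (d.take k) (d.take k) (fun x hx => hx)]
  simp only [Option.none_or]
  rcases Nat.lt_or_ge k d.length with hk | hk
  · have hd : d.drop k = d[k] :: d.drop (k + 1) := List.drop_eq_getElem_cons hk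
    rw [hd, List.find?_cons]
    have : d[k] ∉ d.take k := by
      intro hmem
      obtain ⟨i, hi, hgi⟩ := List.getElem_of_mem hmem
      rw [List.getElem_take] at hgi
      rw [List.length_take] at hi
      have := List.Nodup.getElem_inj_iff hnd |>.mp hgi
      omega
    simp [this, List.getElem?_eq_getElem hk]
  · rw [List.drop_eq_nil_of_le hk, List.getElem?_eq_none hk]
    rfl

-- B's pick loop walks down the dedup of the cleaned list
theorem pvPick_eq (items : List String) : ∀ (n k : Nat),
    dedup5_pick items n ((PySem.Set.ofList (pvCl items)).take k)
      = (PySem.Set.ofList (pvCl items)).take (k + n) := by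
  intro n
  induction n with
  | zero => intro k; simp [dedup5_pick]
  | succ m ih =>
    intro k
    set d := PySem.Set.ofList (pvCl items) with hd
    have hnd : d.Nodup := PySem.Set.nodup_ofList _
    have hfn : dedup5_firstNew items (d.take k) = d[k]? := by
      rw [pvFirstNew_eq]
      have := pvFind_update (pvCl items) [] (d.take k) (by simp)
      rw [PySem.Set.ofList_eq_foldl] at hd
      rw [show PySem.Set.update [] (pvCl items) = d from hd.symm] at this
      rw [← this]
      exact pvFind_take d k hnd
    rw [dedup5_pick, hfn]
    rcases Nat.lt_or_ge k d.length with hk | hk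
    · rw [List.getElem?_eq_getElem hk]
      have : d.take k ++ [d[k]] = d.take (k + 1) := by
        rw [List.take_add_one, List.getElem?_eq_getElem hk]; rfl
      simp only [this, ih (k + 1)]
      congr 1
      omega
    · rw [List.getElem?_eq_none hk]
      show d.take k = d.take (k + (m + 1))
      rw [List.take_of_length_le hk, List.take_of_length_le (by omega : d.length ≤ k + (m + 1))]

-- ===== VERDICT (by name: the statement is the Claim_ definition above) =====
theorem dedup5_py_spec : Claim_equal_dedup5_py := by
  intro items _
  simp only [Spec_dedup5_py, dedup5_py, dedup5_py_alt]
  set d := PySem.Set.ofList (pvCl items) with hd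
  have hloop : dedup5_loopA items PySem.Set.empty [] = d.take 5 := by
    have h := pvLoopA_eq items [] List.nodup_nil (by norm_num)
    simpa [PySem.Set.ofList_eq_foldl, PySem.Set.update, PySem.Set.empty, hd, pvCl] using h
  have hpick : dedup5_pick items 5 [] = d.take 5 := by
    have := pvPick_eq items 5 0
    simpa using this
  set u := d.take 5 with hu
  have hulen : u.length ≤ 5 := by rw [hu]; exact List.length_take_le _ _
  rw [hloop, hpick]
  by_cases hne : u = []
  · rw [hne]
    simp [dedup5_padA]
  · have h1 : 0 < u.length := List.length_pos_iff.mpr hne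
    rw [pvPadA_eq (5 - u.length) u rfl hne]
    have hlen5 : (u ++ List.replicate (5 - u.length) u.getLast!).length = 5 := by
      simp; omega
    have hcond : (u ++ List.replicate (5 - u.length) u.getLast!) ≠ [] := by
      intro h; rw [h] at hlen5; simp at hlen5
    rw [if_pos hcond, if_pos hne, PySem.List.slice_to _ (by norm_num),
      PySem.List.slice_to _ (by norm_num)]
    simp only [show Int.toNat 5 = 5 from rfl]
    rw [List.take_of_length_le (le_of_eq hlen5)]
    rw [List.take_append, List.take_replicate, List.take_of_length_le hulen]
    congr 1
    congr 1
    omega
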